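-- pv_equiv track=rewrite | github.com/mit1221/Social-Networks | network_functions.py | invert_network
-- ===== SOURCE A (Python) =====
-- from typing import List, Tuple, Dict, TextIO
--
-- def invert_network(person_to_networks: Dict[str, List[str]]) -> Dict[str, \
--                                                                      List[str]]:
--     """Return a "network to people" dictionary based on the given "person to
--     networks" dictionary. The values in the dictionary are sorted
--     alphabetically.
--
--     >>> networks = {'Mit Kapadia': ['Chess Club', 'Finance Club'], 'John Ventura': \
--     ['Chess Club', 'Law Association']}
--     >>> invert_network(networks)
--     {'Chess Club': ['John Ventura', 'Mit Kapadia'], 'Finance Club': \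
-- ['Mit Kapadia'], 'Law Association': ['John Ventura']}
--     """
--     network_to_people = {}
--
--     for person in person_to_networks:
--         for network in person_to_networks[person]:
--             create_key_value_pairs(network_to_people, network, person)
--
--     sort_values(network_to_people)
--
--     return network_to_people
--
-- def create_key_value_pairs(dictionary: Dict[str, List[str]], key: str, \
--                            value: str) -> None:
--     """Make a new key-value pair in dictionary with key and value, where all
--     the values in dictionary are of type list.
--
--     >>> d = {}
--     >>> create_key_value_pairs(d, 'Chess Club', 'Mit Kapadia')
--     >>> d
--     {'Chess Club': ['Mit Kapadia']}
--     >>> create_key_value_pairs(d, 'Chess Club', 'John Ventura')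
--     >>> d
--     {'Chess Club': ['Mit Kapadia', 'John Ventura']}
--     """
--     if key not in dictionary:
--         dictionary[key] = []
--     if value not in dictionary[key]:
--         dictionary[key].append(value)
--
-- def sort_values(dictionary_to_sort: Dict[str, List[str]]) -> None:
--     """Sort the values in dictionary_to_sort alphabetically.
--
--     >>> d = {'Parent Association': ['Gloria Pritchett', \
--     'Claire Dunphy'], 'Chess Club': ['Manny Delgado', 'Alex Dunphy']}
--     >>> sort_values(d)
--     >>> d
--     {'Parent Association': ['Claire Dunphy', 'Gloria Pritchett'], \
-- 'Chess Club': ['Alex Dunphy', 'Manny Delgado']}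
--     """
--     for key in dictionary_to_sort:
--         dictionary_to_sort[key].sort()
-- ===== SOURCE B (Python) =====
-- def invert_network(person_to_networks):
--     members = [(p, set(nets)) for p, nets in person_to_networks.items()]
--     keys = list(dict.fromkeys(n for _, nets in person_to_networks.items()
--                               for n in nets))
--     return {net: sorted(p for p, nets in members if net in nets)
--             for net in keys}
-- ===== Notes on version B (the rewrite author's own statement) =====
-- stated objective: alternative
-- what changed: Replaces A's single bucket-filling pass with helper mutation by a dict.fromkeys key-order computation followed by a per-network comprehension that rescans all persons against precomputed membership sets, then sorts each group.
import Mathlib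
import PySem

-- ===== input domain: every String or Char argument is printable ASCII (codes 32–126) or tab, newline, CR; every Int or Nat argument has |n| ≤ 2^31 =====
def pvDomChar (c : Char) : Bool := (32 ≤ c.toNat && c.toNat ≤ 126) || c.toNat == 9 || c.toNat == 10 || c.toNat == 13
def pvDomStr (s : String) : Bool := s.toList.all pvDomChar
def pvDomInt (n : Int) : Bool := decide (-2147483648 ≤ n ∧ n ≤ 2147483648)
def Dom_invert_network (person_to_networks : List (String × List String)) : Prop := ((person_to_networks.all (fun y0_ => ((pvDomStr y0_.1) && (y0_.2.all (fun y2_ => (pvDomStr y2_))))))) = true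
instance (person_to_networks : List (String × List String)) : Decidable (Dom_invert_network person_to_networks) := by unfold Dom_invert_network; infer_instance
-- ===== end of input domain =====

-- B computes the same network→people dict by a different decomposition: key order via
-- dict.fromkeys, then a per-network rescan of all persons against precomputed membership
-- sets, sorting each group (an alternative traversal; not claimed faster).

-- ===== PORT A =====
-- helper create_key_value_pairs(dictionary, key, value): returns the updated dict (Python mutates in place)
def create_key_value_pairs (dictionary : PySem.Dict String (List String)) (key : String) (value : String) : PySem.Dict String (List String) :=
  let d := if dictionary.contains key then dictionary else dictionary.insert key []
  if value ∈ d.getD key [] then d else d.insert key (d.getD key [] ++ [value])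

-- helper sort_values: sorts each value list in place
def sort_values (d : PySem.Dict String (List String)) : PySem.Dict String (List String) :=
  PySem.Dict.mk (d.items.map (fun kv => (kv.1, PySem.List.sorted kv.2 (fun x => x) false)))

def invert_network (person_to_networks : List (String × List String)) : List (String × List String) :=
  let d := PySem.Dict.ofList person_to_networks
  let network_to_people :=
    d.items.foldl (fun acc pr =>
      pr.2.foldl (fun acc network => create_key_value_pairs acc network pr.1) acc)
      PySem.Dict.empty
  (sort_values network_to_people).items

-- ===== PORT B =====
def invert_network_alt (person_to_networks : List (String × List String)) : List (String × List String) :=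
  let d := PySem.Dict.ofList person_to_networks
  let members := d.items.map (fun pr => (pr.1, PySem.Set.ofList pr.2))
  let keys := PySem.List.dedup (d.items.flatMap (fun pr => pr.2))
  keys.map (fun net =>
    (net, PySem.List.sorted
            ((members.filter (fun pr => decide (net ∈ pr.2))).map (·.1))
            (fun x => x) false))

-- ===== PRECONDITION & SPEC =====
def Spec_invert_network (person_to_networks : List (String × List String)) (out : List (String × List String)) : Prop := out = invert_network_alt person_to_networks
instance (person_to_networks : List (String × List String)) (out : List (String × List String)) : Decidable (Spec_invert_network person_to_networks out) := by unfold Spec_invert_network; infer_instance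

-- ===== CLAIM (what is proved, stated in full; the proofs are below) =====
def Claim_equal_invert_network : Prop := ∀ (person_to_networks : List (String × List String)), Dom_invert_network person_to_networks → Spec_invert_network person_to_networks (invert_network person_to_networks)

-- ===== LEMMAS AND PROOFS =====

theorem create_getD_self (d : PySem.Dict String (List String)) (n p : String) :
    (create_key_value_pairs d n p).getD n [] =
      (if p ∈ d.getD n [] then d.getD n [] else d.getD n [] ++ [p]) := by
  unfold create_key_value_pairs
  by_cases hc : d.contains n
  · simp only [hc, if_true]
    split_ifs with h <;> simp [PySem.Dict.getD_insert_self]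
  · simp only [hc]
    have h0 : d.getD n ([] : List String) = [] := PySem.Dict.getD_of_not_contains _ _ (by simpa using hc)
    simp [PySem.Dict.getD_insert_self, h0]

theorem create_getD_other (d : PySem.Dict String (List String)) (n p m : String) (h : m ≠ n) :
    (create_key_value_pairs d n p).getD m [] = d.getD m [] := by
  unfold create_key_value_pairs
  by_cases hc : d.contains n <;>
    simp only [hc, if_true] <;>
    split_ifs <;>
    simp [PySem.Dict.getD_insert_of_ne _ _ _ h]

theorem create_keys (d : PySem.Dict String (List String)) (n p : String) :
    (create_key_value_pairs d n p).keys = PySem.Set.add d.keys n := by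
  unfold create_key_value_pairs
  by_cases hc : d.contains n
  · have hm : n ∈ d.keys := (PySem.Dict.contains_iff_mem_keys _ _).1 hc
    simp only [hc, if_true]
    split_ifs with h
    · exact (PySem.Set.add_of_mem hm).symm
    · rw [PySem.Dict.keys_insert_of_contains _ _ hc, PySem.Set.add_of_mem hm]
  · have hm : n ∉ d.keys := fun h => hc ((PySem.Dict.contains_iff_mem_keys _ _).2 h)
    have hcf : d.contains n = false := by simpa using hc
    have h0 : d.getD n ([] : List String) = [] := PySem.Dict.getD_of_not_contains _ _ hcf
    simp only [hcf, Bool.false_eq_true, if_false, PySem.Dict.getD_insert_self,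
      List.not_mem_nil, List.nil_append]
    rw [PySem.Dict.keys_insert_of_contains _ _ (PySem.Dict.contains_insert_self _ _ _),
      PySem.Dict.keys_insert_of_not_contains _ _ (by simpa using hc),
      PySem.Set.add_of_not_mem hm]

theorem inner_getD (p : String) (ns : List String) :
    ∀ (d : PySem.Dict String (List String)) (net : String),
    (ns.foldl (fun d n => create_key_value_pairs d n p) d).getD net [] =
      (if net ∈ ns ∧ p ∉ d.getD net [] then d.getD net [] ++ [p] else d.getD net []) := by
  induction ns with
  | nil => intro d net; simp
  | cons n ns ih =>
    intro d net
    simp only [List.foldl_cons]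
    rw [ih]
    by_cases hne : net = n
    · subst hne
      rw [create_getD_self]
      by_cases hp : p ∈ d.getD net []
      · simp [hp]
      · have hp2 : p ∈ d.getD net [] ++ [p] := by simp
        simp [hp, hp2]
    · rw [create_getD_other _ _ _ _ hne]
      simp [hne]

theorem inner_keys (p : String) (ns : List String) :
    ∀ (d : PySem.Dict String (List String)),
    (ns.foldl (fun d n => create_key_value_pairs d n p) d).keys = PySem.Set.update d.keys ns := by
  induction ns with
  | nil => intro d; simp [PySem.Set.update_nil]
  | cons n ns ih =>
    intro d
    simp only [List.foldl_cons]
    rw [ih, create_keys, PySem.Set.update_cons]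

theorem outer (items : List (String × List String)) (hnd : (items.map Prod.fst).Nodup) :
    ((items.foldl (fun acc pr => pr.2.foldl (fun acc n => create_key_value_pairs acc n pr.1) acc)
        PySem.Dict.empty).keys = PySem.Set.ofList (items.flatMap (fun pr => pr.2)))
    ∧ ∀ net, (items.foldl (fun acc pr => pr.2.foldl (fun acc n => create_key_value_pairs acc n pr.1) acc)
        PySem.Dict.empty).getD net [] =
        (items.filter (fun pr => decide (net ∈ pr.2))).map Prod.fst := by
  induction items using List.reverseRecOn with
  | nil => exact ⟨by simp [PySem.Dict.keys, PySem.Dict.empty, PySem.Set.ofList_nil], fun net => by simp [PySem.Dict.empty, PySem.Dict.getD, PySem.Dict.get?]⟩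
  | append_singleton xs x ih =>
    have hnd' : (xs.map Prod.fst).Nodup := by
      rw [List.map_append] at hnd; exact hnd.of_append_left
    have hx : x.1 ∉ xs.map Prod.fst := by
      rw [List.map_append, List.nodup_append] at hnd
      intro hmem
      have := hnd.2.2 x.1 hmem
      simp at this
    obtain ⟨ihk, ihg⟩ := ih hnd'
    rw [List.foldl_append] at *
    constructor
    · simp only [List.foldl_cons, List.foldl_nil]
      rw [inner_keys, ihk, ← PySem.Set.ofList_append]
      simp [List.flatMap_append]
    · intro net
      simp only [List.foldl_cons, List.foldl_nil]
      rw [inner_getD, ihg net]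
      have hxb : x.1 ∉ (xs.filter (fun pr => decide (net ∈ pr.2))).map Prod.fst := by
        intro hmem; apply hx
        rcases List.mem_map.mp hmem with ⟨pr, hpr, he⟩
        exact List.mem_map.mpr ⟨pr, List.mem_of_mem_filter hpr, he⟩
      by_cases hm : net ∈ x.2
      · simp [hm, hxb, List.filter_append]
      · simp [hm, List.filter_append]

-- the per-person membership sets select exactly the persons whose original list contains k
theorem filter_members (k : String) (its : List (String × List String)) :
    (((its.map (fun pr => (pr.1, PySem.Set.ofList pr.2))).filter
        (fun pr => decide (k ∈ pr.2))).map (·.1) : List String)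
    = (its.filter (fun pr => decide (k ∈ pr.2))).map Prod.fst := by
  induction its with
  | nil => rfl
  | cons a its ih =>
    by_cases h : k ∈ a.2
    · have h2 : k ∈ PySem.Set.ofList a.2 := (PySem.Set.mem_ofList _ _).mpr h
      simp only [List.map_cons, List.filter_cons]
      simp [h, h2, ih]
    · have h2 : k ∉ PySem.Set.ofList a.2 := fun hm => h ((PySem.Set.mem_ofList _ _).mp hm)
      simp only [List.map_cons, List.filter_cons]
      simp [h, h2, ih]

-- ===== VERDICT (by name: the statement is the Claim_ definition above) =====
theorem invert_network_spec : Claim_equal_invert_network := by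
  intro l _
  unfold Spec_invert_network invert_network invert_network_alt sort_values
  have hnd : (((PySem.Dict.ofList l).items).map Prod.fst).Nodup := by
    have h := PySem.Dict.nodup_keys_ofList (ν := List String) l
    simpa [PySem.Dict.keys] using h
  obtain ⟨hk, hg⟩ := outer (PySem.Dict.ofList l).items hnd
  have hDnd : ((PySem.Dict.ofList l).items.foldl
      (fun acc pr => pr.2.foldl (fun acc n => create_key_value_pairs acc n pr.1) acc)
      PySem.Dict.empty).keys.Nodup := hk ▸ PySem.Set.nodup_ofList _
  simp only [PySem.Dict.items_eq_map_keys _ hDnd ([] : List String), List.map_map,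
    PySem.List.dedup_eq_ofList, ← hk]
  apply List.map_congr_left
  intro k _
  simp only [Function.comp]
  rw [hg k, filter_members k]
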